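-- pv_equiv track=rewrite | github.com/krstoilo/SoftUni-Fundamentals | Python-Fundamentals/Homeworks-and-labs/functions/array_manipulator.py | last_even
-- ===== SOURCE A (Python) =====
-- def last_even(count_last, array):
--     even_array = []
--     needed_count_array = []
--     for i in range(len(array)):
--         if array[i] % 2 == 0:
--             even_array.append(array[i])
--     if count_last > len(even_array):
--         count_last = len(even_array)
--     for n in range((len(even_array) - count_last), len(even_array)):
--         needed_count_array.append(even_array[n])
--     return needed_count_array
-- ===== SOURCE B (Python) =====
-- def last_even(count_last, array):
--     # Single backward pass: collect evens from the end, stopping early once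
--     # count_last of them have been gathered; reverse once to restore order.
--     result = []
--     for x in reversed(array):
--         if len(result) >= count_last:
--             break
--         if x % 2 == 0:
--             result.append(x)
--     result.reverse()
--     return result
-- ===== Notes on version B (the rewrite author's own statement) =====
-- stated objective: alternative
-- what changed: Replaces A's two forward passes (build the full list of evens, then copy its tail by index) with one early-stopping backward pass that prepends at most count_last evens.
import Mathlib
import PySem

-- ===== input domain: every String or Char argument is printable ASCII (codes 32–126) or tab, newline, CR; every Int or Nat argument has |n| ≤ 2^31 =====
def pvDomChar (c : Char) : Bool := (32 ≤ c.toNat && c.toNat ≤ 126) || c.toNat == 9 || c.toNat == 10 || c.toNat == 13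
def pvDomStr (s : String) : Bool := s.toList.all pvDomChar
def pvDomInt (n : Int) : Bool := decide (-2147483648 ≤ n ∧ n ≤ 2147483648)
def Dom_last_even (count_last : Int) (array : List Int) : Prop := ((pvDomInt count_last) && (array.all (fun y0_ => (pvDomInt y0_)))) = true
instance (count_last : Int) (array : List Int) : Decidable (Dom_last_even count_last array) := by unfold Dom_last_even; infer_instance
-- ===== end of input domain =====

-- ===== PORT A =====
-- B is an alternative single backward pass with early exit; same result, proved equal on Dom.
def last_even (count_last : Int) (array : List Int) : List Int :=
  let even_array : List Int :=
    (PySem.List.pyRange 0 (array.length : Int) 1).foldl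
      (fun acc i =>
        if PySem.Int.mod (PySem.List.pyGetD array i 0) 2 = 0 then
          acc ++ [PySem.List.pyGetD array i 0]
        else acc) []
  let count_last : Int :=
    if count_last > (even_array.length : Int) then (even_array.length : Int) else count_last
  (PySem.List.pyRange ((even_array.length : Int) - count_last) (even_array.length : Int) 1).foldl
    (fun acc n => acc ++ [PySem.List.pyGetD even_array n 0]) []

-- ===== PORT B =====
-- loop over reversed(array): break once len(result) >= count_last, else append evens; reverse at end
def lastEvenGo (count_last : Int) (acc : List Int) : List Int → List Int
  | [] => acc
  | x :: rest =>
    if (acc.length : Int) ≥ count_last then acc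
    else if PySem.Int.mod x 2 = 0 then lastEvenGo count_last (acc ++ [x]) rest
    else lastEvenGo count_last acc rest

def last_even_alt (count_last : Int) (array : List Int) : List Int :=
  (lastEvenGo count_last [] array.reverse).reverse

-- ===== PRECONDITION & SPEC =====
def Spec_last_even (count_last : Int) (array : List Int) (out : List Int) : Prop := out = last_even_alt count_last array
instance (count_last : Int) (array : List Int) (out : List Int) : Decidable (Spec_last_even count_last array out) := by unfold Spec_last_even; infer_instance

-- ===== CLAIM (what is proved, stated in full; the proofs are below) =====
def Claim_equal_last_even : Prop := ∀ (count_last : Int) (array : List Int), Dom_last_even count_last array → Spec_last_even count_last array (last_even count_last array)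

-- ===== LEMMAS AND PROOFS =====

-- B's loop collects, from the front of l (a reversed tail), up to (count_last - |acc|) evens, prepended.
theorem lastEvenGo_eq (c : Int) (l : List Int) : ∀ acc : List Int,
    lastEvenGo c acc l =
      acc ++ (l.filter (fun x => decide (PySem.Int.mod x 2 = 0))).take (c.toNat - acc.length) := by
  induction l with
  | nil => intro acc; simp [lastEvenGo]
  | cons x rest ih =>
    intro acc
    by_cases hbrk : (acc.length : Int) ≥ c
    · have h0 : c.toNat - acc.length = 0 := by omega
      simp [lastEvenGo, hbrk, h0]
    · have hpos : 1 ≤ c.toNat - acc.length := by omega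
      by_cases hev : PySem.Int.mod x 2 = 0
      · simp only [lastEvenGo]
        rw [if_neg hbrk, if_pos hev, ih]
        have hf : (x :: rest).filter (fun x => decide (PySem.Int.mod x 2 = 0))
            = x :: rest.filter (fun x => decide (PySem.Int.mod x 2 = 0)) := by
          rw [List.filter_cons_of_pos (by simpa using hev)]
        rw [hf]
        have htk : c.toNat - acc.length = (c.toNat - (acc ++ [x]).length) + 1 := by simp; omega
        rw [htk, List.take_succ_cons]
        simp
      · simp only [lastEvenGo]
        rw [if_neg hbrk, if_neg hev, ih,
          List.filter_cons_of_neg (by simpa using hev)]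

theorem last_even_alt_eq (c : Int) (a : List Int) :
    last_even_alt c a =
      (((a.filter (fun x => decide (PySem.Int.mod x 2 = 0))).reverse.take c.toNat)).reverse := by
  unfold last_even_alt
  rw [lastEvenGo_eq]
  simp [List.filter_reverse]

theorem drop_clamp_eq_take_reverse (E : List Int) (c : Int) :
    E.drop (((E.length : Int) - (if c > (E.length : Int) then (E.length : Int) else c)).toNat)
      = (E.reverse.take c.toNat).reverse := by
  rw [List.take_reverse]
  simp only [List.reverse_reverse]
  by_cases h1 : c > (E.length : Int)
  · rw [if_pos h1]
    have : ((E.length : Int) - (E.length : Int)).toNat = E.length - c.toNat := by omega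
    rw [this]
  · rw [if_neg h1]
    by_cases h2 : 0 ≤ c
    · have : ((E.length : Int) - c).toNat = E.length - c.toNat := by omega
      rw [this]
    · rw [List.drop_eq_nil_of_le (by omega), List.drop_eq_nil_of_le (by omega)]

-- ===== VERDICT (by name: the statement is the Claim_ definition above) =====
theorem last_even_spec : Claim_equal_last_even := by
  intro c a _
  unfold Spec_last_even
  rw [last_even_alt_eq]
  unfold last_even
  have h1 : (PySem.List.pyRange 0 (a.length : Int) 1).foldl
      (fun acc i =>
        if PySem.Int.mod (PySem.List.pyGetD a i 0) 2 = 0 then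
          acc ++ [PySem.List.pyGetD a i 0]
        else acc) [] = a.filter (fun x => decide (PySem.Int.mod x 2 = 0)) := by
    rw [PySem.List.foldl_append_ite (fun i => PySem.Int.mod (PySem.List.pyGetD a i 0) 2 = 0)
      (fun i => PySem.List.pyGetD a i 0)]
    have hmap := PySem.List.map_pyGetD_pyRange_zero a 0
    calc ([] : List Int) ++ ((PySem.List.pyRange 0 (a.length : Int) 1).filter
            (fun i => decide (PySem.Int.mod (PySem.List.pyGetD a i 0) 2 = 0))).map
            (fun i => PySem.List.pyGetD a i 0)
        = ((PySem.List.pyRange 0 (a.length : Int) 1).map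
            (fun i => PySem.List.pyGetD a i 0)).filter
            (fun x => decide (PySem.Int.mod x 2 = 0)) := by
          rw [List.nil_append, List.filter_map]
          rfl
      _ = a.filter (fun x => decide (PySem.Int.mod x 2 = 0)) := by
          rw [show PySem.List.pyRange 0 (a.length : Int) 1
                = PySem.List.pyRange 0 (PySem.List.len a) 1 from rfl, hmap]
  simp only [h1]
  set E := a.filter (fun x => decide (PySem.Int.mod x 2 = 0)) with hE
  rw [PySem.List.foldl_append_singleton_eq_map (fun n => PySem.List.pyGetD E n 0), List.nil_append]
  have hge : (0 : Int) ≤ (E.length : Int) - (if c > (E.length : Int) then (E.length : Int) else c) := by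
    split <;> omega
  rw [show PySem.List.pyRange ((E.length : Int) - (if c > (E.length : Int) then (E.length : Int) else c)) (E.length : Int) 1
        = PySem.List.pyRange ((E.length : Int) - (if c > (E.length : Int) then (E.length : Int) else c)) (PySem.List.len E) 1 from rfl,
      PySem.List.map_pyGetD_pyRange E 0 hge]
  exact drop_clamp_eq_take_reverse E c
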